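-- pv_equiv track=rewrite | github.com/SPacc24/FYP | project/mapping/technique_mapper.py | build_attack_chain
-- ===== SOURCE A (Python) =====
-- from typing import Any
--
-- def build_attack_chain(vulnerabilities: list[dict[str, Any]]) -> list[dict[str, Any]]:
--     chain: list[dict[str, Any]] = []
--
--     if any(v["service"] in {"http", "https", "ftp", "telnet"} for v in vulnerabilities):
--         chain.append({
--             "stage": "Initial Access / Exposure Review",
--             "logic": "Prioritise exposed public-facing or remote-access services first.",
--             "techniques": "T1190 / T1021 / T1046",
--         })
--
--     if any(v["service"] in {"ftp", "ssh", "telnet", "mysql", "ms-wbt-server"} for v in vulnerabilities):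
--         chain.append({
--             "stage": "Credential Attack Surface",
--             "logic": "Services requiring authentication are candidates for password-policy review and brute-force-resistance validation.",
--             "techniques": "T1110 / T1078",
--         })
--
--     if any(v["service"] in {"microsoft-ds", "netbios-ssn", "wsman"} for v in vulnerabilities):
--         chain.append({
--             "stage": "Lateral Movement Surface",
--             "logic": "SMB/remote management services may support lateral movement if credentials are obtained.",
--             "techniques": "T1021.002 / T1021.006 / T1135",
--         })
--
--     if not chain:
--         chain.append({
--             "stage": "Reconnaissance Only",
--             "logic": "No open high-risk services were mapped. Continue monitoring filtered/closed results and rescan if exposure changes.",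
--             "techniques": "T1046",
--         })
--
--     return chain
-- ===== SOURCE B (Python) =====
-- def build_attack_chain(vulnerabilities):
--     exposure = credential = lateral = False
--     for v in vulnerabilities:
--         if exposure and credential and lateral:
--             break
--         s = v["service"]
--         exposure = exposure or s in {"http", "https", "ftp", "telnet"}
--         credential = credential or s in {"ftp", "ssh", "telnet", "mysql", "ms-wbt-server"}
--         lateral = lateral or s in {"microsoft-ds", "netbios-ssn", "wsman"}
--     chain = []
--     if exposure:
--         chain.append({
--             "stage": "Initial Access / Exposure Review",
--             "logic": "Prioritise exposed public-facing or remote-access services first.",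
--             "techniques": "T1190 / T1021 / T1046",
--         })
--     if credential:
--         chain.append({
--             "stage": "Credential Attack Surface",
--             "logic": "Services requiring authentication are candidates for password-policy review and brute-force-resistance validation.",
--             "techniques": "T1110 / T1078",
--         })
--     if lateral:
--         chain.append({
--             "stage": "Lateral Movement Surface",
--             "logic": "SMB/remote management services may support lateral movement if credentials are obtained.",
--             "techniques": "T1021.002 / T1021.006 / T1135",
--         })
--     if not chain:
--         chain.append({
--             "stage": "Reconnaissance Only",
--             "logic": "No open high-risk services were mapped. Continue monitoring filtered/closed results and rescan if exposure changes.",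
--             "techniques": "T1046",
--         })
--     return chain
-- ===== Notes on version B (the rewrite author's own statement) =====
-- stated objective: alternative
-- what changed: Replaces A's three separate any() scans over the vulnerability list with a single pass that maintains three boolean flags (exposure/credential/lateral) and breaks once all are set; the stage dicts are then appended from the flags.
import Mathlib
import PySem

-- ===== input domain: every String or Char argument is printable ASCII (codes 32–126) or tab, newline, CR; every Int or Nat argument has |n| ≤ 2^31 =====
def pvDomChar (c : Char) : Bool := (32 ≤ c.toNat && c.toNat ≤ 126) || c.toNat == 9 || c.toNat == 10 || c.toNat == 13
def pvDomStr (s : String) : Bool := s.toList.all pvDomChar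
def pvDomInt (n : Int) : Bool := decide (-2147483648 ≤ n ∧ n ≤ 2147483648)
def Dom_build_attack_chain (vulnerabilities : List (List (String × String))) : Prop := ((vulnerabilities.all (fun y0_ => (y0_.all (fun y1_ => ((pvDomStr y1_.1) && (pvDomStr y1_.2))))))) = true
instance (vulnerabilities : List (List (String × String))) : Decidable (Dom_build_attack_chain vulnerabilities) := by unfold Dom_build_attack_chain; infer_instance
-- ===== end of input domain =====

-- B replaces A's three separate any() scans with one pass keeping three boolean flags
-- (breaking once all three are set); same return value, objective: alternative decomposition.

-- shared helpers: the service of a vuln dict (default "", reached only where Pre_ guarantees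
-- the key or a prior category match; exact on Pre_) and the three category membership tests
def pvSvc (v : List (String × String)) : String := (PySem.Dict.get? (PySem.Dict.mk v) "service").getD ""
def pvHasSvc (v : List (String × String)) : Bool := (PySem.Dict.get? (PySem.Dict.mk v) "service").isSome
def pvIsExp (s : String) : Bool := ["http", "https", "ftp", "telnet"].contains s
def pvIsCred (s : String) : Bool := ["ftp", "ssh", "telnet", "mysql", "ms-wbt-server"].contains s
def pvIsLat (s : String) : Bool := ["microsoft-ds", "netbios-ssn", "wsman"].contains s

def pvStageExp : List (String × String) :=
  [("stage", "Initial Access / Exposure Review"),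
   ("logic", "Prioritise exposed public-facing or remote-access services first."),
   ("techniques", "T1190 / T1021 / T1046")]
def pvStageCred : List (String × String) :=
  [("stage", "Credential Attack Surface"),
   ("logic", "Services requiring authentication are candidates for password-policy review and brute-force-resistance validation."),
   ("techniques", "T1110 / T1078")]
def pvStageLat : List (String × String) :=
  [("stage", "Lateral Movement Surface"),
   ("logic", "SMB/remote management services may support lateral movement if credentials are obtained."),
   ("techniques", "T1021.002 / T1021.006 / T1135")]
def pvStageRecon : List (String × String) :=
  [("stage", "Reconnaissance Only"),
   ("logic", "No open high-risk services were mapped. Continue monitoring filtered/closed results and rescan if exposure changes."),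
   ("techniques", "T1046")]

-- ===== PORT A =====
def build_attack_chain (vulnerabilities : List (List (String × String))) : List (List (String × String)) :=
  let chain : List (List (String × String)) := []
  let chain := if vulnerabilities.any (fun v => pvIsExp (pvSvc v)) then chain ++ [pvStageExp] else chain
  let chain := if vulnerabilities.any (fun v => pvIsCred (pvSvc v)) then chain ++ [pvStageCred] else chain
  let chain := if vulnerabilities.any (fun v => pvIsLat (pvSvc v)) then chain ++ [pvStageLat] else chain
  if chain.isEmpty then chain ++ [pvStageRecon] else chain

-- ===== PORT B =====
-- single pass maintaining the three flags, stopping once all are true (Source B's loop)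
def pvScan : List (List (String × String)) → Bool → Bool → Bool → Bool × Bool × Bool
  | [], e, c, l => (e, c, l)
  | v :: rest, e, c, l =>
    if e && c && l then (e, c, l)
    else
      let s := pvSvc v
      pvScan rest (e || pvIsExp s) (c || pvIsCred s) (l || pvIsLat s)

def build_attack_chain_alt (vulnerabilities : List (List (String × String))) : List (List (String × String)) :=
  let (e, c, l) := pvScan vulnerabilities false false false
  let chain : List (List (String × String)) :=
    (if e then [pvStageExp] else []) ++ (if c then [pvStageCred] else []) ++ (if l then [pvStageLat] else [])
  if chain = [] then [pvStageRecon] else chain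

-- ===== PRECONDITION & SPEC =====
-- Pre_ excludes exactly the inputs on which Python A raises KeyError: an entry without a
-- "service" key is allowed only if each of the three category scans already found a match
-- strictly before it (then every any() short-circuits and A returns normally).
def Pre_build_attack_chain (vulnerabilities : List (List (String × String))) : Prop :=
  ∀ i : Fin vulnerabilities.length, pvHasSvc vulnerabilities[i] = false →
    ((vulnerabilities.take i).any (fun v => pvIsExp (pvSvc v)) = true ∧
     (vulnerabilities.take i).any (fun v => pvIsCred (pvSvc v)) = true ∧
     (vulnerabilities.take i).any (fun v => pvIsLat (pvSvc v)) = true)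
instance (vulnerabilities : List (List (String × String))) : Decidable (Pre_build_attack_chain vulnerabilities) := by
  unfold Pre_build_attack_chain; infer_instance

def pvWitness_build_attack_chain : (List (List (String × String))) := [[("service", "http")]]

def Spec_build_attack_chain (vulnerabilities : List (List (String × String))) (out : List (List (String × String))) : Prop := out = build_attack_chain_alt vulnerabilities
instance (vulnerabilities : List (List (String × String))) (out : List (List (String × String))) : Decidable (Spec_build_attack_chain vulnerabilities out) := by unfold Spec_build_attack_chain; infer_instance

-- ===== CLAIM (what is proved, stated in full; the proofs are below) =====
def Claim_equal_build_attack_chain : Prop := ∀ (vulnerabilities : List (List (String × String))), Dom_build_attack_chain vulnerabilities → Pre_build_attack_chain vulnerabilities → Spec_build_attack_chain vulnerabilities (build_attack_chain vulnerabilities)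

-- ===== LEMMAS AND PROOFS =====
-- the one-pass scan computes the same three booleans as the three any() scans
theorem pvScan_eq (xs : List (List (String × String))) (e c l : Bool) :
    pvScan xs e c l =
      (e || xs.any (fun v => pvIsExp (pvSvc v)),
       c || xs.any (fun v => pvIsCred (pvSvc v)),
       l || xs.any (fun v => pvIsLat (pvSvc v))) := by
  induction xs generalizing e c l with
  | nil => simp [pvScan]
  | cons v rest ih =>
    by_cases h : e && c && l
    · obtain ⟨⟨he, hc⟩, hl⟩ := by simpa [Bool.and_eq_true] using h
      simp [pvScan, he, hc, hl]
    · simp only [pvScan, h, Bool.false_eq_true, if_false, ih]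
      simp [List.any_cons, Bool.or_assoc]

-- ===== VERDICT (by name: the statement is the Claim_ definition above) =====
theorem build_attack_chain_spec : Claim_equal_build_attack_chain := by
  intro L _ _
  unfold Spec_build_attack_chain build_attack_chain build_attack_chain_alt
  rw [pvScan_eq]
  by_cases h1 : L.any (fun v => pvIsExp (pvSvc v)) <;>
    by_cases h2 : L.any (fun v => pvIsCred (pvSvc v)) <;>
      by_cases h3 : L.any (fun v => pvIsLat (pvSvc v)) <;>
        simp [h1, h2, h3, pvStageExp, pvStageCred, pvStageLat]
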